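-- pv_equiv track=rewrite | github.com/Nhed1/matrix-challenge-undb | index.py | dfs
-- ===== SOURCE A (Python) =====
-- def dfs(matrix, visited, i, j):
--     if i < 0 or i >= 5 or j < 0 or j >= 5:
--         return False
--
--     if matrix[i][j] == 1 or visited[i][j]:
--         return False
--
--     visited[i][j] = True
--
--     if i == 4 and j == 4:
--         return True
--
--     return dfs(matrix, visited, i+1, j) or dfs(matrix, visited, i-1, j) or dfs(matrix, visited, i, j+1) or dfs(matrix, visited, i, j-1)
-- ===== SOURCE B (Python) =====
-- def dfs(matrix, visited, i, j):
--     stack = [(i, j)]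
--     while stack:
--         a, b = stack.pop()
--         if a < 0 or a >= 5 or b < 0 or b >= 5:
--             continue
--         if matrix[a][b] == 1 or visited[a][b]:
--             continue
--         visited[a][b] = True
--         if a == 4 and b == 4:
--             return True
--         stack.extend([(a, b - 1), (a, b + 1), (a - 1, b), (a + 1, b)])
--     return False
-- ===== Notes on version B (the rewrite author's own statement) =====
-- stated objective: alternative
-- what changed: The recursive four-way DFS is replaced by an iterative DFS with an explicit stack of (i,j) coordinates, pushing neighbours in reverse order so the pop order, the short-circuit stop at (4,4) and the final visited marking are identical.
-- outside the precondition, e.g. on dfs([[1]], [[False]], 0, 0): A returns False, B returns False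
import Mathlib
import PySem

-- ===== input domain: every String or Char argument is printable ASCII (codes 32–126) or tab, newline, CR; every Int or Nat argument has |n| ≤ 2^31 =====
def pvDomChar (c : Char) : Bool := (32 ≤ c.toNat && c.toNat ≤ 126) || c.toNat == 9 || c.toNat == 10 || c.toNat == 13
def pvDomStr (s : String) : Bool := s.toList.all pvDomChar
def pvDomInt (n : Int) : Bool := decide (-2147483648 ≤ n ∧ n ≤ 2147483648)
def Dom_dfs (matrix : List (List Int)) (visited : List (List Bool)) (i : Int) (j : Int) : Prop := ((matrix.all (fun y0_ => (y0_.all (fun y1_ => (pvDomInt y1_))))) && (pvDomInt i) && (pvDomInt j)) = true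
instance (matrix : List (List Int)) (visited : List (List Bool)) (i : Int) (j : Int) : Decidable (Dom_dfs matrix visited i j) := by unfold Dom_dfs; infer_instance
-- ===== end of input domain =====

-- B replaces the recursive DFS by an explicit-stack iterative DFS with the same pop order,
-- stop condition and visited marking; equal cost, different decomposition. Both A and B mutate
-- the caller's `visited` identically; the theorems here are about the return value.

-- ===== PORT A =====
-- shared cell access (both Pythons index matrix[i][j] / visited[i][j] with 0 ≤ i,j < 5,
-- guaranteed in range by the guard; Pre_ excludes shapes on which Python would raise IndexError)
def matCell (matrix : List (List Int)) (i j : Int) : Int :=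
  (((matrix[i.toNat]?).getD [])[j.toNat]?).getD 0

def visCell (visited : List (List Bool)) (i j : Int) : Bool :=
  (((visited[i.toNat]?).getD [])[j.toNat]?).getD false

def visSet (visited : List (List Bool)) (i j : Int) : List (List Bool) :=
  visited.set i.toNat (((visited[i.toNat]?).getD []).set j.toNat true)

-- A's recursion, made total with a fuel counter; fuel 26 always suffices on Pre_ inputs
-- (each recursion level first marks one of the 25 cells).  Returns (result, final visited).
def dfsFuel (matrix : List (List Int)) : Nat → List (List Bool) → Int → Int → Bool × List (List Bool)
  | 0, v, _, _ => (false, v)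
  | f + 1, v, i, j =>
    if i < 0 ∨ 5 ≤ i ∨ j < 0 ∨ 5 ≤ j then (false, v)
    else if matCell matrix i j = 1 ∨ visCell v i j then (false, v)
    else
      let v1 := visSet v i j
      if i = 4 ∧ j = 4 then (true, v1)
      else
        let r1 := dfsFuel matrix f v1 (i + 1) j
        if r1.1 then r1 else
        let r2 := dfsFuel matrix f r1.2 (i - 1) j
        if r2.1 then r2 else
        let r3 := dfsFuel matrix f r2.2 i (j + 1)
        if r3.1 then r3 else
        dfsFuel matrix f r3.2 i (j - 1)

def dfs (matrix : List (List Int)) (visited : List (List Bool)) (i : Int) (j : Int) : Bool :=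
  (dfsFuel matrix 26 visited i j).1

-- ===== PORT B =====
-- B's while-loop over an explicit stack (list head = top of stack; Python's list.pop() pops the
-- last pushed element, so extend [(a,b-1),(a,b+1),(a-1,b),(a+1,b)] becomes consing in reverse).
-- Fuel 105 always suffices on Pre_ inputs: each iteration pops one entry and at most 25
-- iterations push 4 entries each, so at most 1 + 4*25 iterations occur.
def loopFuel (matrix : List (List Int)) : Nat → List (List Bool) → List (Int × Int) → Bool
  | 0, _, _ => false
  | f + 1, v, stack =>
    match stack with
    | [] => false
    | (a, b) :: rest =>
      if a < 0 ∨ 5 ≤ a ∨ b < 0 ∨ 5 ≤ b then loopFuel matrix f v rest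
      else if matCell matrix a b = 1 ∨ visCell v a b then loopFuel matrix f v rest
      else
        let v1 := visSet v a b
        if a = 4 ∧ b = 4 then true
        else loopFuel matrix f v1 ((a + 1, b) :: (a - 1, b) :: (a, b + 1) :: (a, b - 1) :: rest)

def dfs_alt (matrix : List (List Int)) (visited : List (List Bool)) (i : Int) (j : Int) : Bool :=
  loopFuel matrix 105 visited [(i, j)]

-- ===== PRECONDITION & SPEC =====
-- Pre_ excludes inputs on which Python A raises IndexError: a start inside the 5×5 bounds with a
-- matrix/visited that is not a full 5×5 grid.  It requires the full 5×5 shape whenever the start is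
-- in range, because whether A raises on a smaller grid depends on the path the DFS explores; this
-- also excludes some small-grid inputs on which A happens to return False before hitting a missing
-- index (e.g. an immediate wall, see the cite).
def Pre_dfs (matrix : List (List Int)) (visited : List (List Bool)) (i : Int) (j : Int) : Prop :=
  (i < 0 ∨ 5 ≤ i ∨ j < 0 ∨ 5 ≤ j) ∨
    (matrix.length = 5 ∧ (∀ r ∈ matrix, r.length = 5) ∧
     visited.length = 5 ∧ (∀ r ∈ visited, r.length = 5))
instance (matrix : List (List Int)) (visited : List (List Bool)) (i : Int) (j : Int) : Decidable (Pre_dfs matrix visited i j) := by unfold Pre_dfs; infer_instance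

def pvWitness_dfs : List (List Int) × List (List Bool) × Int × Int :=
  ([[0,0,0,0,0],[0,1,1,1,0],[0,0,0,1,0],[1,1,0,0,0],[0,0,0,1,0]],
   ([[false,false,false,false,false],[false,false,false,false,false],[false,false,false,false,false],[false,false,false,false,false],[false,false,false,false,false]],
    0, 0))

def Spec_dfs (matrix : List (List Int)) (visited : List (List Bool)) (i : Int) (j : Int) (out : Bool) : Prop := out = dfs_alt matrix visited i j
instance (matrix : List (List Int)) (visited : List (List Bool)) (i : Int) (j : Int) (out : Bool) : Decidable (Spec_dfs matrix visited i j out) := by unfold Spec_dfs; infer_instance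

-- ===== CLAIM (what is proved, stated in full; the proofs are below) =====
def Claim_equal_dfs : Prop := ∀ (matrix : List (List Int)) (visited : List (List Bool)) (i : Int) (j : Int), Dom_dfs matrix visited i j → Pre_dfs matrix visited i j → Spec_dfs matrix visited i j (dfs matrix visited i j)

-- ===== LEMMAS AND PROOFS =====

-- visited grids of the right shape
def goodV (v : List (List Bool)) : Prop := v.length = 5 ∧ ∀ r ∈ v, r.length = 5

-- the 25 in-range coordinates, and the number of still-unvisited in-range cells (loop measure)
def coords : List (Nat × Nat) := (List.range 5).flatMap (fun a => (List.range 5).map (fun b => (a, b)))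

def unvis (v : List (List Bool)) : Nat :=
  coords.countP (fun p => !((v[p.1]?).getD [])[p.2]?.getD false)

theorem unvis_le (v : List (List Bool)) : unvis v ≤ 25 := by
  have h := List.countP_le_length (l := coords) (p := fun p => !((v[p.1]?).getD [])[p.2]?.getD false)
  simpa [coords] using h

theorem goodV_set (v : List (List Bool)) (i j : Int) (h : goodV v) : goodV (visSet v i j) := by
  obtain ⟨hl, hr⟩ := h
  by_cases hlt : i.toNat < v.length
  · refine ⟨by simpa [visSet] using hl, ?_⟩
    intro r hrm
    rcases List.mem_or_eq_of_mem_set hrm with h1 | h2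
    · exact hr r h1
    · subst h2
      have hrow : v[i.toNat]?.getD [] = v[i.toNat] := by
        simp [List.getElem?_eq_getElem hlt]
      rw [hrow, List.length_set]
      exact hr _ (List.getElem_mem hlt)
  · have : visSet v i j = v := by
      simp [visSet, List.set_eq_of_length_le (by omega : v.length ≤ i.toNat)]
    rw [this]; exact ⟨hl, hr⟩

theorem countP_lt_of_mem {α : Type} {l : List α} {p q : α → Bool}
    (h : ∀ x ∈ l, p x = true → q x = true) (x : α) (hx : x ∈ l)
    (hq : q x = true) (hp : p x = false) : l.countP p < l.countP q := by
  induction l with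
  | nil => cases hx
  | cons a t ih =>
    rcases List.mem_cons.mp hx with hx | hx
    · subst hx
      have ht : t.countP p ≤ t.countP q :=
        List.countP_mono_left (fun y hy => h y (List.mem_cons_of_mem _ hy))
      simp [hp, hq]
      omega
    · have hh : p a = true → q a = true := h a List.mem_cons_self
      have hlt := ih (fun y hy hpy => h y (List.mem_cons_of_mem _ hy) hpy) hx
      by_cases hpa : p a = true
      · simp [hpa, hh hpa]; omega
      · simp only [Bool.not_eq_true] at hpa
        simp only [List.countP_cons, hpa]
        by_cases hqa : q a = true <;> simp [hqa] <;> omega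

-- reading a cell of `visSet v i j`
theorem cell_set_same (v : List (List Bool)) (i j : Int) (h : goodV v)
    (hi : i.toNat < 5) (hj : j.toNat < 5) :
    ((visSet v i j)[i.toNat]?.getD [])[j.toNat]?.getD false = true := by
  obtain ⟨hl, hr⟩ := h
  have hi' : i.toNat < v.length := by omega
  have hrow : ((v[i.toNat]).length) = 5 := hr _ (List.getElem_mem hi')
  have h1 : (visSet v i j)[i.toNat]? = some (((v[i.toNat]?).getD []).set j.toNat true) := by
    simp [visSet, hi']
  rw [h1]
  have hj' : j.toNat < ((v[i.toNat]?).getD []).length := by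
    simp [List.getElem?_eq_getElem hi']; omega
  simp [hj']

theorem cell_set_other (v : List (List Bool)) (i j : Int) (a b : Nat)
    (hne : ¬(a = i.toNat ∧ b = j.toNat)) :
    ((visSet v i j)[a]?.getD [])[b]?.getD false = ((v[a]?).getD [])[b]?.getD false := by
  by_cases ha : a = i.toNat
  · have hb : b ≠ j.toNat := fun hb => hne ⟨ha, hb⟩
    rw [ha]
    by_cases hi' : i.toNat < v.length
    · have h1 : (visSet v i j)[i.toNat]? = some (((v[i.toNat]?).getD []).set j.toNat true) := by
        simp [visSet, hi']
      rw [h1]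
      simp [List.getElem?_set_ne (Ne.symm hb), List.getElem?_eq_getElem hi']
    · have he : visSet v i j = v := by
        simp [visSet]
        exact List.set_eq_of_length_le (by omega)
      rw [he]
  · simp [visSet, List.getElem?_set_ne (fun hc => ha hc.symm)]

theorem unvis_set_lt (v : List (List Bool)) (i j : Int) (h : goodV v)
    (hi0 : 0 ≤ i) (hi5 : i < 5) (hj0 : 0 ≤ j) (hj5 : j < 5)
    (hun : ((v[i.toNat]?).getD [])[j.toNat]?.getD false = false) :
    unvis (visSet v i j) < unvis v := by
  have hi : i.toNat < 5 := by omega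
  have hj : j.toNat < 5 := by omega
  apply countP_lt_of_mem (x := (i.toNat, j.toNat))
  · intro x hx hpx
    by_cases hxe : x.1 = i.toNat ∧ x.2 = j.toNat
    · exfalso
      have := cell_set_same v i j h hi hj
      rw [show x = (i.toNat, j.toNat) from Prod.ext hxe.1 hxe.2] at hpx
      simp [this] at hpx
    · have := cell_set_other v i j x.1 x.2 hxe
      simpa [this] using hpx
  · unfold coords
    exact List.mem_flatMap.mpr ⟨i.toNat, List.mem_range.mpr hi,
      List.mem_map.mpr ⟨j.toNat, List.mem_range.mpr hj, rfl⟩⟩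
  · simp [hun]
  · simp [cell_set_same v i j h hi hj]

-- dfsFuel only marks cells: shape preserved, unvisited count never grows
theorem dfs_mono (matrix : List (List Int)) :
    ∀ (f : Nat) (v : List (List Bool)) (i j : Int), goodV v →
      goodV (dfsFuel matrix f v i j).2 ∧ unvis (dfsFuel matrix f v i j).2 ≤ unvis v := by
  intro f
  induction f with
  | zero => intro v i j hg; simp [dfsFuel]; exact hg
  | succ f ih =>
    intro v i j hg
    simp only [dfsFuel]
    split
    · exact ⟨hg, le_refl _⟩
    · split
      · exact ⟨hg, le_refl _⟩
      · rename_i hoob hblk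
        have hi0 : 0 ≤ i := by omega
        have hi5 : i < 5 := by omega
        have hj0 : 0 ≤ j := by omega
        have hj5 : j < 5 := by omega
        have hun : ((v[i.toNat]?).getD [])[j.toNat]?.getD false = false := by
          simp [visCell] at hblk
          simpa [visCell] using hblk.2
        have hg1 : goodV (visSet v i j) := goodV_set v i j hg
        have hlt : unvis (visSet v i j) < unvis v :=
          unvis_set_lt v i j hg hi0 hi5 hj0 hj5 hun
        split
        · exact ⟨hg1, le_of_lt hlt⟩
        · have h1 := ih (visSet v i j) (i + 1) j hg1
          split
          · exact ⟨h1.1, le_trans h1.2 (le_of_lt hlt)⟩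
          · have h2 := ih (dfsFuel matrix f (visSet v i j) (i + 1) j).2 (i - 1) j h1.1
            split
            · exact ⟨h2.1, le_trans h2.2 (le_trans h1.2 (le_of_lt hlt))⟩
            · have h3 := ih _ i (j + 1) h2.1
              split
              · exact ⟨h3.1, le_trans h3.2 (le_trans h2.2 (le_trans h1.2 (le_of_lt hlt)))⟩
              · have h4 := ih _ i (j - 1) h3.1
                exact ⟨h4.1, le_trans h4.2 (le_trans h3.2 (le_trans h2.2 (le_trans h1.2 (le_of_lt hlt))))⟩

-- loopFuel does not depend on the fuel once it exceeds the loop measure |stack| + 4·unvis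
theorem loop_irrel (matrix : List (List Int)) :
    ∀ (f : Nat) (f' : Nat) (v : List (List Bool)) (s : List (Int × Int)), goodV v →
      s.length + 4 * unvis v < f → s.length + 4 * unvis v < f' →
      loopFuel matrix f v s = loopFuel matrix f' v s := by
  intro f
  induction f with
  | zero => intro f' v s _ h _; omega
  | succ f ih =>
    intro f' v s hg hf hf'
    match f', s with
    | 0, s => omega
    | f' + 1, [] => simp [loopFuel]
    | f' + 1, (a, b) :: rest =>
      simp only [loopFuel]
      split
      · exact ih f' v rest hg (by simp at hf ⊢; omega) (by simp at hf' ⊢; omega)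
      · split
        · exact ih f' v rest hg (by simp at hf ⊢; omega) (by simp at hf' ⊢; omega)
        · rename_i hoob hblk
          split
          · rfl
          · have hun : ((v[a.toNat]?).getD [])[b.toNat]?.getD false = false := by
              simp [visCell] at hblk
              simpa [visCell] using hblk.2
            have hlt : unvis (visSet v a b) < unvis v :=
              unvis_set_lt v a b hg (by omega) (by omega) (by omega) (by omega) hun
            exact ih f' (visSet v a b) _ (goodV_set v a b hg)
              (by simp at hf ⊢; omega) (by simp at hf' ⊢; omega)

-- SIMULATION: popping (i,j) off the stack behaves like one recursive call of A, then the rest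
theorem sim (matrix : List (List Int)) :
    ∀ (n : Nat) (v : List (List Bool)) (i j : Int) (rest : List (Int × Int)) (fA fB fB' : Nat),
      goodV v → unvis v ≤ n → unvis v < fA →
      (rest.length + 1) + 4 * unvis v < fB →
      rest.length + 4 * unvis (dfsFuel matrix fA v i j).2 < fB' →
      loopFuel matrix fB v ((i, j) :: rest) =
        (if (dfsFuel matrix fA v i j).1 then true
         else loopFuel matrix fB' (dfsFuel matrix fA v i j).2 rest) := by
  intro n
  induction n using Nat.strong_induction_on with
  | _ n IH =>
    intro v i j rest fA fB fB' hg hn hfA hfB hfB'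
    match fA, fB with
    | 0, fB => omega
    | fA + 1, 0 => omega
    | fA + 1, fB + 1 =>
      by_cases hoob : i < 0 ∨ 5 ≤ i ∨ j < 0 ∨ 5 ≤ j
      · have hd : dfsFuel matrix (fA + 1) v i j = (false, v) := by
          simp [dfsFuel, hoob]
        rw [hd] at hfB' ⊢
        have hl : loopFuel matrix (fB + 1) v ((i, j) :: rest) = loopFuel matrix fB v rest := by
          simp [loopFuel, hoob]
        rw [hl]
        simp only [Bool.false_eq_true, if_false]
        exact loop_irrel matrix fB fB' v rest hg (by simp at hfB; omega) (by simpa using hfB')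
      · by_cases hblk : matCell matrix i j = 1 ∨ visCell v i j = true
        · have hd : dfsFuel matrix (fA + 1) v i j = (false, v) := by
            simp only [dfsFuel]
            rw [if_neg hoob, if_pos hblk]
          rw [hd] at hfB' ⊢
          have hl : loopFuel matrix (fB + 1) v ((i, j) :: rest) = loopFuel matrix fB v rest := by
            simp only [loopFuel]
            rw [if_neg hoob, if_pos hblk]
          rw [hl]
          simp only [Bool.false_eq_true, if_false]
          exact loop_irrel matrix fB fB' v rest hg (by simp at hfB; omega) (by simpa using hfB')
        · have hi0 : 0 ≤ i := by omega
          have hi5 : i < 5 := by omega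
          have hj0 : 0 ≤ j := by omega
          have hj5 : j < 5 := by omega
          have hun : ((v[i.toNat]?).getD [])[j.toNat]?.getD false = false := by
            simp [visCell] at hblk
            simpa [visCell] using hblk.2
          have hg1 : goodV (visSet v i j) := goodV_set v i j hg
          have hlt : unvis (visSet v i j) < unvis v :=
            unvis_set_lt v i j hg hi0 hi5 hj0 hj5 hun
          set v1 := visSet v i j with hv1
          by_cases hgoal : i = 4 ∧ j = 4
          · have hd : dfsFuel matrix (fA + 1) v i j = (true, v1) := by
              simp only [dfsFuel]
              rw [if_neg hoob, if_neg hblk, if_pos hgoal]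
            have hl : loopFuel matrix (fB + 1) v ((i, j) :: rest) = true := by
              simp only [loopFuel]
              rw [if_neg hoob, if_neg hblk, if_pos hgoal]
            rw [hd, hl]
            simp
          · have hm1 := dfs_mono matrix fA v1 (i + 1) j hg1
            set r1 := dfsFuel matrix fA v1 (i + 1) j with hr1
            have hm2 := dfs_mono matrix fA r1.2 (i - 1) j hm1.1
            set r2 := dfsFuel matrix fA r1.2 (i - 1) j with hr2
            have hm3 := dfs_mono matrix fA r2.2 i (j + 1) hm2.1
            set r3 := dfsFuel matrix fA r2.2 i (j + 1) with hr3
            have hm4 := dfs_mono matrix fA r3.2 i (j - 1) hm3.1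
            set r4 := dfsFuel matrix fA r3.2 i (j - 1) with hr4
            have hd : dfsFuel matrix (fA + 1) v i j =
                (if r1.1 then r1 else if r2.1 then r2 else if r3.1 then r3 else r4) := by
              simp only [dfsFuel]
              rw [if_neg hoob, if_neg hblk, if_neg hgoal]
            have hl : loopFuel matrix (fB + 1) v ((i, j) :: rest) =
                loopFuel matrix fB v1 ((i + 1, j) :: (i - 1, j) :: (i, j + 1) :: (i, j - 1) :: rest) := by
              simp only [loopFuel]
              rw [if_neg hoob, if_neg hblk, if_neg hgoal]
            rw [hd] at hfB' ⊢
            rw [hl]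
            -- peel neighbour 1
            rw [IH (unvis v1) (by omega) v1 (i + 1) j _ fA fB
                 (((i - 1, j) :: (i, j + 1) :: (i, j - 1) :: rest).length + 4 * unvis r1.2 + 1)
                 hg1 (le_refl _) (by omega) (by simp; try omega) (by try rw [← hr1]; try omega), ← hr1]
            by_cases hb1 : r1.1 = true
            · simp [hb1]
            simp only [Bool.not_eq_true] at hb1
            simp only [hb1, Bool.false_eq_true, if_false] at hfB' ⊢
            -- peel neighbour 2
            rw [IH (unvis v1) (by omega) r1.2 (i - 1) j _ fA _
                 (((i, j + 1) :: (i, j - 1) :: rest).length + 4 * unvis r2.2 + 1)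
                 hm1.1 hm1.2 (by omega) (by simp; try omega) (by try rw [← hr2]; try omega), ← hr2]
            by_cases hb2 : r2.1 = true
            · simp [hb2]
            simp only [Bool.not_eq_true] at hb2
            simp only [hb2, Bool.false_eq_true, if_false] at hfB' ⊢
            -- peel neighbour 3
            rw [IH (unvis v1) (by omega) r2.2 i (j + 1) _ fA _
                 (((i, j - 1) :: rest).length + 4 * unvis r3.2 + 1)
                 hm2.1 (le_trans hm2.2 hm1.2) (by omega) (by simp; try omega) (by try rw [← hr3]; try omega), ← hr3]
            by_cases hb3 : r3.1 = true
            · simp [hb3]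
            simp only [Bool.not_eq_true] at hb3
            simp only [hb3, Bool.false_eq_true, if_false] at hfB' ⊢
            -- peel neighbour 4
            rw [IH (unvis v1) (by omega) r3.2 i (j - 1) _ fA _ fB'
                 hm3.1 (le_trans hm3.2 (le_trans hm2.2 hm1.2)) (by omega)
                 (by simp; try omega)
                 (by try rw [← hr4]; try omega), ← hr4]

theorem loop_nil (matrix : List (List Int)) (f : Nat) (v : List (List Bool)) :
    loopFuel matrix f v [] = false := by
  cases f <;> simp [loopFuel]

-- ===== VERDICT (by name: the statement is the Claim_ definition above) =====
theorem dfs_spec : Claim_equal_dfs := by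
  intro matrix visited i j _ hpre
  unfold Spec_dfs dfs dfs_alt
  by_cases hoob : i < 0 ∨ 5 ≤ i ∨ j < 0 ∨ 5 ≤ j
  · have hd : dfsFuel matrix (25 + 1) visited i j = (false, visited) := by
      rw [dfsFuel, if_pos hoob]
    have hl : loopFuel matrix (104 + 1) visited [(i, j)] = false := by
      rw [loopFuel, if_pos hoob, loop_nil]
    show (dfsFuel matrix (25 + 1) visited i j).1 = loopFuel matrix (104 + 1) visited [(i, j)]
    rw [hd, hl]
  · have hg : goodV visited := by
      rcases hpre with h | h
      · exact absurd h hoob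
      · exact ⟨h.2.2.1, h.2.2.2⟩
    have h25 := unvis_le visited
    have h25' := (dfs_mono matrix 26 visited i j hg).2
    rw [sim matrix (unvis visited) visited i j [] 26 105 105 hg (le_refl _)
        (by omega) (by simp; try omega) (by simp; have := unvis_le (dfsFuel matrix 26 visited i j).2; omega)]
    rcases Bool.eq_false_or_eq_true (dfsFuel matrix 26 visited i j).1 with hb | hb
    · simp [hb]
    · rw [hb]
      simp only [Bool.false_eq_true, if_false]
      exact (loop_nil matrix 105 _).symm
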